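-- pv_equiv track=rewrite | github.com/iammrhelo/11747-project | Zhao2017/train.py | input_transpose_src
-- ===== SOURCE A (Python) =====
-- def input_transpose_src(sents, pad_token, max_len):
--     batch_size = len(sents)
--
--     sents_t = []
--     masks = []
--     for i in range(max_len):
--         sents_t.append([sents[k][i] if len(sents[k]) > i else pad_token for k in range(batch_size)])
--         masks.append([1 if len(sents[k]) > i else 0 for k in range(batch_size)])
--
--     return sents_t, masks
-- ===== SOURCE B (Python) =====
-- def input_transpose_src(sents, pad_token, max_len):
--     batch_size = len(sents)
--     sents_t = [[pad_token] * batch_size for _ in range(max_len)]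
--     masks = [[0] * batch_size for _ in range(max_len)]
--     for k, s in enumerate(sents):
--         for i, tok in enumerate(s):
--             if i < max_len:
--                 sents_t[i][k] = tok
--                 masks[i][k] = 1
--     return sents_t, masks
-- ===== Notes on version B (the rewrite author's own statement) =====
-- stated objective: alternative
-- what changed: Instead of gathering each output row column-by-column (re-indexing every sentence and rebuilding per-cell conditionals max_len times), B preallocates both grids with repeated defaults and scatter-fills them in one pass over only the actual tokens; measured consistently faster in practice, same asymptotic cost.
import Mathlib
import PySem

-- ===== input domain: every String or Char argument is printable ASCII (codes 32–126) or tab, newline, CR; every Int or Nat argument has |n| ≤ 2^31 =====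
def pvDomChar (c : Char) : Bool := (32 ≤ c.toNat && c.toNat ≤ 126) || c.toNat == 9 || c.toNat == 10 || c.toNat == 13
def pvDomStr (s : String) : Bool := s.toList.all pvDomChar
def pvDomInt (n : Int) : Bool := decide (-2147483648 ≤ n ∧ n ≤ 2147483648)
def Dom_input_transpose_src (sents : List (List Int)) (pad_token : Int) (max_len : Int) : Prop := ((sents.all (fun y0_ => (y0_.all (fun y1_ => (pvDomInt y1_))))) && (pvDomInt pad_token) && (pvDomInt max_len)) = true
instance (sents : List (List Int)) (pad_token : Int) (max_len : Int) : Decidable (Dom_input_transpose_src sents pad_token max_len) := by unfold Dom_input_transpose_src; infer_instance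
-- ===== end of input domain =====

-- B replaces A's column-by-column gather with preallocated default grids scatter-filled in one pass over the tokens (alternative decomposition, same cost).

-- ===== PORT A =====
-- literal transliteration of A: for i in range(max_len), append the gathered row and the mask row.
-- sents[k] / sents[k][i] are ported with pyGetD; both indices are in range whenever read (k ∈ range(batch_size), and i < len(sents[k]) under the guard), so the defaults are never used.
def input_transpose_src (sents : List (List Int)) (pad_token : Int) (max_len : Int) : List (List Int) × List (List Int) :=
  let batch_size : Int := (sents.length : Int)
  (PySem.List.pyRange 0 max_len 1).foldl
    (fun st i =>
      (st.1 ++ [(PySem.List.pyRange 0 batch_size 1).map (fun k =>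
          if i < ((PySem.List.pyGetD sents k []).length : Int)
          then PySem.List.pyGetD (PySem.List.pyGetD sents k []) i pad_token else pad_token)],
       st.2 ++ [(PySem.List.pyRange 0 batch_size 1).map (fun k =>
          if i < ((PySem.List.pyGetD sents k []).length : Int) then (1 : Int) else 0)]))
    ([], [])

-- ===== PORT B =====
-- literal transliteration of B: preallocate both grids, then for k, s in enumerate(sents), for i, tok in enumerate(s), if i < max_len scatter into row i, column k.
-- sents_t[i][k] = tok becomes modify i (set k tok); both indices are always in range there, so set/modify never drop a write.
def input_transpose_src_alt (sents : List (List Int)) (pad_token : Int) (max_len : Int) : List (List Int) × List (List Int) :=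
  let batch_size := sents.length
  let sents_t0 := List.replicate max_len.toNat (List.replicate batch_size pad_token)
  let masks0 := List.replicate max_len.toNat (List.replicate batch_size (0 : Int))
  (PySem.List.enumerate sents).foldl
    (fun g ks =>
      (PySem.List.enumerate ks.2).foldl
        (fun g2 it =>
          if it.1 < max_len then
            (g2.1.modify it.1.toNat (fun row => row.set ks.1.toNat it.2),
             g2.2.modify it.1.toNat (fun row => row.set ks.1.toNat 1))
          else g2) g)
    (sents_t0, masks0)

-- ===== PRECONDITION & SPEC =====
def Spec_input_transpose_src (sents : List (List Int)) (pad_token : Int) (max_len : Int) (out : List (List Int) × List (List Int)) : Prop := out = input_transpose_src_alt sents pad_token max_len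
instance (sents : List (List Int)) (pad_token : Int) (max_len : Int) (out : List (List Int) × List (List Int)) : Decidable (Spec_input_transpose_src sents pad_token max_len out) := by unfold Spec_input_transpose_src; infer_instance

-- ===== CLAIM (what is proved, stated in full; the proofs are below) =====
def Claim_equal_input_transpose_src : Prop := ∀ (sents : List (List Int)) (pad_token : Int) (max_len : Int), Dom_input_transpose_src sents pad_token max_len → Spec_input_transpose_src sents pad_token max_len (input_transpose_src sents pad_token max_len)

-- ===== LEMMAS AND PROOFS =====

-- one column-fill (B's inner loop on one sentence, writing into column c; v is the stored value: id for sents_t, const 1 for masks)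
def fillCol (ml : Int) (c : Nat) (v : Int → Int) (s : List Int) (j0 : Int) (st : List (List Int)) : List (List Int) :=
  (PySem.List.enumerate s j0).foldl
    (fun a it => if it.1 < ml then a.modify it.1.toNat (fun row => row.set c (v it.2)) else a) st

-- B's outer loop, acting on one grid component
def fillAll (ml : Int) (v : Int → Int) (ss : List (List Int)) (k0 : Int) (st : List (List Int)) : List (List Int) :=
  (PySem.List.enumerate ss k0).foldl (fun a ks => fillCol ml ks.1.toNat v ks.2 0 a) st

-- the effect of fillAll on the row at index i, expressed recursively
def rowApply (ml : Int) (v : Int → Int) (ss : List (List Int)) (k0 : Nat) (i : Nat) (row : List Int) : List Int :=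
  match ss with
  | [] => row
  | s :: tl => rowApply ml v tl (k0 + 1) i (if i < s.length ∧ (i : Int) < ml then row.set k0 (v (s.getD i 0)) else row)

lemma foldl_prod_split {α β γ : Type} (l : List α) (f : β → α → β) (g : γ → α → γ) (b : β) (c : γ) :
    l.foldl (fun p x => (f p.1 x, g p.2 x)) (b, c) = (l.foldl f b, l.foldl g c) := by
  induction l generalizing b c with
  | nil => rfl
  | cons x xs ih => simp [List.foldl_cons, ih]

lemma inner_split (ml : Int) (c : Nat) (l : List (Int × Int)) (a b : List (List Int)) :
    l.foldl (fun g2 it =>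
        if it.1 < ml then
          (g2.1.modify it.1.toNat (fun row => row.set c it.2),
           g2.2.modify it.1.toNat (fun row => row.set c 1))
        else g2) (a, b)
    = (l.foldl (fun x it => if it.1 < ml then x.modify it.1.toNat (fun row => row.set c it.2) else x) a,
       l.foldl (fun x it => if it.1 < ml then x.modify it.1.toNat (fun row => row.set c 1) else x) b) := by
  induction l generalizing a b with
  | nil => rfl
  | cons x xs ih =>
    by_cases h : x.1 < ml <;> simp [List.foldl_cons, h, ih]

-- B's fold decomposes into two independent component folds
lemma alt_eq (sents : List (List Int)) (pad_token : Int) (max_len : Int) :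
    input_transpose_src_alt sents pad_token max_len
      = (fillAll max_len (fun t => t) sents 0 (List.replicate max_len.toNat (List.replicate sents.length pad_token)),
         fillAll max_len (fun _ => 1) sents 0 (List.replicate max_len.toNat (List.replicate sents.length 0))) := by
  simp only [input_transpose_src_alt, fillAll, fillCol]
  rw [show (fun (g : List (List Int) × List (List Int)) (ks : Int × List Int) =>
        (PySem.List.enumerate ks.2).foldl
          (fun g2 it =>
            if it.1 < max_len then
              (g2.1.modify it.1.toNat (fun row => row.set ks.1.toNat it.2),
               g2.2.modify it.1.toNat (fun row => row.set ks.1.toNat 1))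
            else g2) g)
      = (fun g ks =>
          ((fun (x : List (List Int)) (ks : Int × List Int) => (PySem.List.enumerate ks.2).foldl (fun x it => if it.1 < max_len then x.modify it.1.toNat (fun row => row.set ks.1.toNat it.2) else x) x) g.1 ks,
           (fun (x : List (List Int)) (ks : Int × List Int) => (PySem.List.enumerate ks.2).foldl (fun x it => if it.1 < max_len then x.modify it.1.toNat (fun row => row.set ks.1.toNat 1) else x) x) g.2 ks))
      from funext fun g => funext fun ks => by rw [← inner_split]]
  exact foldl_prod_split (PySem.List.enumerate sents)
    (fun (x : List (List Int)) (ks : Int × List Int) => (PySem.List.enumerate ks.2).foldl (fun x it => if it.1 < max_len then x.modify it.1.toNat (fun row => row.set ks.1.toNat it.2) else x) x)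
    (fun (x : List (List Int)) (ks : Int × List Int) => (PySem.List.enumerate ks.2).foldl (fun x it => if it.1 < max_len then x.modify it.1.toNat (fun row => row.set ks.1.toNat 1) else x) x) _ _

lemma fillCol_getElem? (ml : Int) (c : Nat) (v : Int → Int) (s : List Int) (j0 : Nat) (st : List (List Int)) (i : Nat) :
    (fillCol ml c v s (j0 : Int) st)[i]?
      = if j0 ≤ i ∧ i - j0 < s.length ∧ (i : Int) < ml
        then (fun row => row.set c (v (s.getD (i - j0) 0))) <$> st[i]?
        else st[i]? := by
  induction s generalizing j0 st with
  | nil =>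
    rw [if_neg (by simp only [List.length_nil]; omega)]
    rfl
  | cons x xs ih =>
    unfold fillCol
    rw [PySem.List.enumerate_cons]
    simp only [List.foldl_cons]
    rw [show ((j0 : Int) + 1) = ((j0 + 1 : Nat) : Int) by push_cast; ring]
    rw [show ∀ st' : List (List Int), (PySem.List.enumerate xs ((j0 + 1 : Nat) : Int)).foldl
          (fun a it => if it.1 < ml then a.modify it.1.toNat (fun row => row.set c (v it.2)) else a) st'
        = fillCol ml c v xs ((j0 + 1 : Nat) : Int) st' from fun _ => rfl]
    rw [ih]
    simp only [Int.toNat_natCast]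
    by_cases hml : (j0 : Int) < ml
    · rw [if_pos hml]
      by_cases hij : i = j0
      · subst hij
        rw [if_neg (by omega), if_pos ⟨le_rfl, by simp only [List.length_cons]; omega, hml⟩]
        rw [List.getElem?_modify]
        simp only [Nat.sub_self]
        cases st[i]? with
        | none => rfl
        | some r => simp [List.getD]
      · have hst : (st.modify j0 (fun row => row.set c (v x)))[i]? = st[i]? := by
          rw [List.getElem?_modify]
          cases st[i]? with
          | none => rfl
          | some r => simp [Ne.symm hij]
        rw [hst]
        by_cases hc : j0 + 1 ≤ i ∧ i - (j0 + 1) < xs.length ∧ (i : Int) < ml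
        · rw [if_pos hc, if_pos ⟨by omega, by simp only [List.length_cons]; omega, hc.2.2⟩]
          have hgd : (x :: xs).getD (i - j0) 0 = xs.getD (i - (j0 + 1)) 0 := by
            rw [show i - j0 = (i - (j0 + 1)) + 1 by omega]; rfl
          rw [hgd]
        · rw [if_neg hc, if_neg (by
            rintro ⟨h1, h2, h3⟩
            simp only [List.length_cons] at h2
            exact hc ⟨by omega, by omega, h3⟩)]
    · rw [if_neg hml]
      rw [if_neg (by rintro ⟨h1, h2, h3⟩; omega), if_neg (by rintro ⟨h1, h2, h3⟩; omega)]

lemma fillAll_getElem? (ml : Int) (v : Int → Int) (ss : List (List Int)) (k0 : Nat) (st : List (List Int)) (i : Nat) :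
    (fillAll ml v ss (k0 : Int) st)[i]? = (rowApply ml v ss k0 i) <$> st[i]? := by
  induction ss generalizing k0 st with
  | nil =>
    simp only [fillAll, PySem.List.enumerate_nil, List.foldl_nil, rowApply]
    cases st[i]? <;> rfl
  | cons s tl ih =>
    unfold fillAll
    rw [PySem.List.enumerate_cons]
    simp only [List.foldl_cons]
    rw [show ((k0 : Int) + 1) = ((k0 + 1 : Nat) : Int) by push_cast; ring]
    rw [show ∀ st' : List (List Int), (PySem.List.enumerate tl ((k0 + 1 : Nat) : Int)).foldl
          (fun a ks => fillCol ml ks.1.toNat v ks.2 0 a) st'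
        = fillAll ml v tl ((k0 + 1 : Nat) : Int) st' from fun _ => rfl]
    rw [ih]
    rw [show ((k0 : Int).toNat) = k0 from Int.toNat_natCast k0]
    rw [show ((0 : Int)) = ((0 : Nat) : Int) from rfl]
    rw [fillCol_getElem? ml k0 v s 0 st i]
    simp only [Nat.sub_zero]
    cases hst : st[i]? with
    | none => split <;> rfl
    | some r =>
      by_cases hc : i < s.length ∧ (i : Int) < ml
      · rw [if_pos ⟨Nat.zero_le i, hc.1, hc.2⟩]
        show some (rowApply ml v tl (k0 + 1) i (r.set k0 (v (s.getD i 0)))) = some (rowApply ml v (s :: tl) k0 i r)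
        rw [show rowApply ml v (s :: tl) k0 i r = rowApply ml v tl (k0 + 1) i (if i < s.length ∧ (i : Int) < ml then r.set k0 (v (s.getD i 0)) else r) from rfl, if_pos hc]
      · rw [if_neg (by rintro ⟨h1, h2, h3⟩; exact hc ⟨h2, h3⟩)]
        show some (rowApply ml v tl (k0 + 1) i r) = some (rowApply ml v (s :: tl) k0 i r)
        rw [show rowApply ml v (s :: tl) k0 i r = rowApply ml v tl (k0 + 1) i (if i < s.length ∧ (i : Int) < ml then r.set k0 (v (s.getD i 0)) else r) from rfl, if_neg hc]

lemma rowApply_getElem? (ml : Int) (v : Int → Int) (ss : List (List Int)) (k0 : Nat) (i : Nat) (row : List Int) (k : Nat) :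
    (rowApply ml v ss k0 i row)[k]?
      = if k0 ≤ k ∧ k - k0 < ss.length ∧ i < (ss.getD (k - k0) []).length ∧ (i : Int) < ml
        then (if k < row.length then some (v ((ss.getD (k - k0) []).getD i 0)) else none)
        else row[k]? := by
  induction ss generalizing k0 row with
  | nil =>
    rw [if_neg (by simp only [List.length_nil]; omega)]
    rfl
  | cons s tl ih =>
    rw [show rowApply ml v (s :: tl) k0 i row = rowApply ml v tl (k0 + 1) i (if i < s.length ∧ (i : Int) < ml then row.set k0 (v (s.getD i 0)) else row) from rfl]
    rw [ih]
    have hlen : (if i < s.length ∧ (i : Int) < ml then row.set k0 (v (s.getD i 0)) else row).length = row.length := by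
      split <;> simp
    rw [hlen]
    by_cases hkk : k = k0
    · subst hkk
      rw [if_neg (by omega)]
      by_cases hc : i < s.length ∧ (i : Int) < ml
      · rw [if_pos hc, List.getElem?_set, if_pos rfl]
        have hcond : k ≤ k ∧ k - k < (s :: tl).length ∧ i < ((s :: tl).getD (k - k) []).length ∧ (i : Int) < ml :=
          ⟨le_rfl, by simp only [List.length_cons]; omega, by simpa using hc.1, hc.2⟩
        rw [if_pos hcond]
        simp only [Nat.sub_self]
        rfl
      · rw [if_neg hc, if_neg (by
          rintro ⟨h1, h2, h3, h4⟩
          simp only [Nat.sub_self] at h3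
          exact hc ⟨by simpa using h3, h4⟩)]
    · have hrow : (if i < s.length ∧ (i : Int) < ml then row.set k0 (v (s.getD i 0)) else row)[k]? = row[k]? := by
        split
        · rw [List.getElem?_set, if_neg (Ne.symm hkk)]
        · rfl
      rw [hrow]
      have hgd : (s :: tl).getD (k - k0) [] = tl.getD (k - (k0 + 1)) [] ∨ k < k0 := by
        by_cases hlt : k0 < k
        · left; rw [show k - k0 = (k - (k0 + 1)) + 1 by omega]; rfl
        · right; omega
      by_cases hc : k0 + 1 ≤ k ∧ k - (k0 + 1) < tl.length ∧ i < (tl.getD (k - (k0 + 1)) []).length ∧ (i : Int) < ml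
      · obtain hgd | hlt := hgd
        · rw [if_pos hc]
          have hcond : k0 ≤ k ∧ k - k0 < (s :: tl).length ∧ i < ((s :: tl).getD (k - k0) []).length ∧ (i : Int) < ml := by
            refine ⟨by omega, by simp only [List.length_cons]; omega, ?_, hc.2.2.2⟩
            rw [hgd]; exact hc.2.2.1
          rw [if_pos hcond, hgd]
        · omega
      · rw [if_neg hc, if_neg (by
          rintro ⟨h1, h2, h3, h4⟩
          obtain hgd | hlt := hgd
          · simp only [List.length_cons] at h2
            rw [hgd] at h3
            exact hc ⟨by omega, by omega, h3, h4⟩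
          · omega)]

lemma fillAll_getElem?_zero (ml : Int) (v : Int → Int) (ss : List (List Int)) (st : List (List Int)) (i : Nat) :
    (fillAll ml v ss 0 st)[i]? = (rowApply ml v ss 0 i) <$> st[i]? := by
  have h := fillAll_getElem? ml v ss 0 st i
  simpa using h

-- A's loop appends one row per iteration: it is the map over range(max_len)
lemma foldl_push2 {α : Type} (l : List α) (f g : α → List Int) (a b : List (List Int)) :
    l.foldl (fun st i => (st.1 ++ [f i], st.2 ++ [g i])) (a, b) = (a ++ l.map f, b ++ l.map g) := by
  induction l generalizing a b with
  | nil => simp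
  | cons x xs ih => simp [List.foldl_cons, ih]

-- one component of A's gathered output equals the corresponding scatter-filled grid of B
lemma grid_eq (sents : List (List Int)) (ml : Int) (v : Int → Int) (dflt : Int) :
    (PySem.List.pyRange 0 ml 1).map (fun i => (PySem.List.pyRange 0 (sents.length : Int) 1).map (fun k =>
        if i < ((PySem.List.pyGetD sents k []).length : Int)
        then v ((PySem.List.pyGetD sents k []).getD i.toNat 0) else dflt))
      = fillAll ml v sents 0 (List.replicate ml.toNat (List.replicate sents.length dflt)) := by
  apply List.ext_getElem?
  intro i
  rw [fillAll_getElem?_zero]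
  rw [List.getElem?_replicate]
  by_cases hi : i < ml.toNat
  · rw [if_pos hi]
    rw [show (PySem.List.pyRange 0 ml 1) = (PySem.List.pyRange 0 ((ml.toNat : Int)) 1) by
      rw [Int.toNat_of_nonneg (by omega)]]
    rw [PySem.List.getElem?_map_pyRange_zero _ ml.toNat i hi]
    rw [show (rowApply ml v sents 0 i) <$> some (List.replicate sents.length dflt) = some (rowApply ml v sents 0 i (List.replicate sents.length dflt)) from rfl]
    congr 1
    apply List.ext_getElem?
    intro k
    rw [rowApply_getElem?]
    simp only [Nat.sub_zero, List.length_replicate, List.getElem?_replicate, Int.toNat_natCast]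
    by_cases hk : k < sents.length
    · rw [PySem.List.getElem?_map_pyRange_zero _ sents.length k hk]
      have hpg : PySem.List.pyGetD sents (k : Int) [] = sents.getD k [] := by
        rw [PySem.List.pyGetD_of_nonneg sents [] (by omega), Int.toNat_natCast]
      simp only [hpg]
      split_ifs <;> first | rfl | (exfalso; omega)
    · rw [if_neg (by rintro ⟨h1, h2, h3, h4⟩; exact hk h2), if_neg hk]
      apply List.getElem?_eq_none
      rw [List.length_map, PySem.List.length_pyRange_one]
      omega
  · rw [if_neg hi]
    have hlen : (PySem.List.pyRange 0 ml 1).length ≤ i := by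
      rw [PySem.List.length_pyRange_one]; omega
    rw [List.getElem?_eq_none (by rw [List.length_map]; exact hlen)]
    rfl

-- ===== VERDICT (by name: the statement is the Claim_ definition above) =====
theorem input_transpose_src_spec : Claim_equal_input_transpose_src := by
  intro sents pad_token max_len _
  unfold Spec_input_transpose_src
  rw [alt_eq]
  simp only [input_transpose_src]
  rw [foldl_push2]
  simp only [List.nil_append]
  refine Prod.ext ?_ ?_
  · simp only []
    rw [← grid_eq sents max_len (fun t => t) pad_token]
    apply List.map_congr_left
    intro i hi
    apply List.map_congr_left
    intro k hk
    rw [PySem.List.mem_pyRange_one] at hi hk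
    by_cases h : i < ((PySem.List.pyGetD sents k []).length : Int)
    · rw [if_pos h, if_pos h]
      rw [PySem.List.pyGetD_eq_getElem _ pad_token (by omega) h]
      rw [List.getD_eq_getElem _ 0 (by omega)]
    · rw [if_neg h, if_neg h]
  · simp only []
    rw [← grid_eq sents max_len (fun _ => 1) 0]
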